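-- pv_equiv track=rewrite | github.com/CodeAnt100/OpenHacks-Hackathon | Chemical Identification.py | organic_identification
-- ===== SOURCE A (Python) =====
-- def organic_identification(structuralFormula):
--
--     structuralFormula = structuralFormula.upper()
--     compoundName = ""
--
--     # Defines chain prefixes
--     chainPrefixArray = [" ", "meth", "eth", "prop", "but", "pent", "hex", "hept", "oct", "non", "dec"]
--
--     # Checks if compound is a hydrocarbon
--     hydrocarbon = True
--     alkane = True
--     hydrocarbonArray = ["C", "H", "2", "3", "(", ")", "4", "5", "6", "7", "8", "9"]
--     characterCompositionArray = [0 for i in range(len(hydrocarbonArray))]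
--
--     for char in structuralFormula:
--         if char not in hydrocarbonArray:
--             hydrocarbon = False
--
--         else:
--             characterCompositionArray[hydrocarbonArray.index(char)] += 1
--
--             # Checks if compound is an alkane
--             if char in hydrocarbonArray[4:]:
--                 alkane = False
--
--
--     if alkane:
--         compoundName = chainPrefixArray[characterCompositionArray[0]] + "ane"
--
--
--     return compoundName
-- ===== SOURCE B (Python) =====
-- def _carbons(s):
--     # Divide and conquer over the string: None if a non-alkane character
--     # occurs anywhere, otherwise the number of 'C's.
--     if len(s) == 0:
--         return 0
--     if len(s) == 1:
--         if s in "()456789":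
--             return None
--         return 1 if s == "C" else 0
--     mid = len(s) // 2
--     left = _carbons(s[:mid])
--     if left is None:
--         return None
--     right = _carbons(s[mid:])
--     if right is None:
--         return None
--     return left + right
--
--
-- def organic_identification(structuralFormula):
--     chainPrefixArray = [" ", "meth", "eth", "prop", "but", "pent", "hex", "hept", "oct", "non", "dec"]
--     n = _carbons(structuralFormula.upper())
--     return "" if n is None else chainPrefixArray[n] + "ane"
-- ===== Notes on version B (the rewrite author's own statement) =====
-- stated objective: alternative
-- what changed: Replaces A's single left-to-right loop with its 12-slot composition array, per-character list.index scan and flag bookkeeping by a recursive divide-and-conquer pass that splits the string in half and combines Option carbon counts (None = non-alkane character), then indexes the prefix table once with the combined count.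
import Mathlib
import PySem

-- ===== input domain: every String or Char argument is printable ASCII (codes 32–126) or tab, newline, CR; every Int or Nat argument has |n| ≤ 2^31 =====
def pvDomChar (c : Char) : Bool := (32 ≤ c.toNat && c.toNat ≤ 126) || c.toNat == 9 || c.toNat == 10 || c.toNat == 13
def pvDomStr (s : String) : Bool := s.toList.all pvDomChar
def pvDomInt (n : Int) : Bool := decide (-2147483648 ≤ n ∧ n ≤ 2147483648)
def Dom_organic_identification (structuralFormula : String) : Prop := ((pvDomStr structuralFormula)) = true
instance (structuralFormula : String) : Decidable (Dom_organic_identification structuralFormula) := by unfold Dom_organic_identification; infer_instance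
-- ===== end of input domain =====

-- B replaces A's composition-array loop by a divide-and-conquer pass combining Option carbon
-- counts, then a single prefix-table lookup (objective: alternative decomposition, not faster).


-- ===== PORT A =====
def pvHyd : List Char := ['C', 'H', '2', '3', '(', ')', '4', '5', '6', '7', '8', '9']

-- the loop body of A: state = (hydrocarbon, alkane, characterCompositionArray)
def pvStepA (st : Bool × Bool × List Int) (char : Char) : Bool × Bool × List Int :=
  match PySem.List.index? pvHyd char with
  | none => (false, st.2.1, st.2.2)
  | some i =>
      (st.1,
       if char ∈ pvHyd.drop 4 then false else st.2.1,
       st.2.2.set i (st.2.2.getD i 0 + 1))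

def organic_identification (structuralFormula : String) : String :=
  let f := PySem.Str.upper structuralFormula
  let chainPrefixArray : List String := [" ", "meth", "eth", "prop", "but", "pent", "hex", "hept", "oct", "non", "dec"]
  let st := f.toList.foldl pvStepA (true, true, List.replicate 12 (0 : Int))
  if st.2.1 = true then
    -- chainPrefixArray[characterCompositionArray[0]]: pyGetD is exact under Pre_ (index in range)
    PySem.List.pyGetD chainPrefixArray (st.2.2.getD 0 0) "" ++ "ane"
  else ""

-- ===== PORT B =====
def pvForbidden : List Char := ['(', ')', '4', '5', '6', '7', '8', '9']

-- _carbons of Source B; s[:mid] / s[mid:] with 0 ≤ mid ≤ len are exactly take/drop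
def pvCarbons : List Char → Option Int
  | [] => some 0
  | [c] => if pvForbidden.contains c then none else some (if c = 'C' then 1 else 0)
  | a :: b :: t =>
      let l := a :: b :: t
      let mid := l.length / 2
      match pvCarbons (l.take mid) with
      | none => none
      | some x =>
        match pvCarbons (l.drop mid) with
        | none => none
        | some y => some (x + y)
termination_by l => l.length
decreasing_by
  · simp; omega
  · simp; omega

def organic_identification_alt (structuralFormula : String) : String :=
  let chainPrefixArray : List String := [" ", "meth", "eth", "prop", "but", "pent", "hex", "hept", "oct", "non", "dec"]
  match pvCarbons (PySem.Str.upper structuralFormula).toList with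
  | none => ""
  | some n => PySem.List.pyGetD chainPrefixArray n "" ++ "ane"  -- chainPrefixArray[n]: exact under Pre_

-- ===== PRECONDITION & SPEC =====
-- Pre_ excludes exactly the inputs where Python A raises IndexError: more than 10 carbon
-- letters (either case) while no forbidden character occurs (there both A and B raise).
def Pre_organic_identification (structuralFormula : String) : Prop :=
  (PySem.Str.upper structuralFormula).toList.any (fun c => pvForbidden.contains c) = true
  ∨ (PySem.Str.upper structuralFormula).toList.count 'C' ≤ 10

instance (structuralFormula : String) : Decidable (Pre_organic_identification structuralFormula) := by
  unfold Pre_organic_identification; infer_instance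

def pvWitness_organic_identification : String := "CH3CH3"

def Spec_organic_identification (structuralFormula : String) (out : String) : Prop := out = organic_identification_alt structuralFormula
instance (structuralFormula : String) (out : String) : Decidable (Spec_organic_identification structuralFormula out) := by unfold Spec_organic_identification; infer_instance

-- ===== CLAIM (what is proved, stated in full; the proofs are below) =====
def Claim_equal_organic_identification : Prop := ∀ (structuralFormula : String), Dom_organic_identification structuralFormula → Pre_organic_identification structuralFormula → Spec_organic_identification structuralFormula (organic_identification structuralFormula)

-- ===== LEMMAS AND PROOFS =====

-- the alkane flag after the loop: initial flag && no forbidden character seen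
theorem pvStepA_alkane (st : Bool × Bool × List Int) (c : Char) :
    (pvStepA st c).2.1 = (st.2.1 && !(pvForbidden.contains c)) := by
  rcases h : PySem.List.index? pvHyd c with _ | i
  all_goals have hc' := h
  all_goals rw [PySem.List.index?_eq_idxOf?] at h
  · have hc : c ∉ pvHyd := (PySem.List.index?_eq_none_iff _ _).1 hc'
    have hnf : c ∉ pvForbidden := by
      intro hmem; exact hc (by simp [pvForbidden] at hmem; simp [pvHyd]; tauto)
    simp [pvStepA, h, hnf]
  · by_cases hf : c ∈ pvForbidden
    · have hd : c ∈ pvHyd.drop 4 := by simp [pvForbidden] at hf; simp [pvHyd]; tauto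
      simp [pvStepA, h, hd, hf]
    · have hd : c ∉ pvHyd.drop 4 := by
        intro hmem; exact hf (by simp [pvHyd] at hmem; simp [pvForbidden]; tauto)
      simp [pvStepA, h, hd, hf]

theorem pvFoldA_alkane (l : List Char) : ∀ (h a : Bool) (comp : List Int),
    (l.foldl pvStepA (h, a, comp)).2.1 = (a && !(l.any (fun c => pvForbidden.contains c))) := by
  induction l with
  | nil => intro h a comp; simp
  | cons c t ih =>
      intro h a comp
      have hs := pvStepA_alkane (h, a, comp) c
      rcases hst : pvStepA (h, a, comp) c with ⟨h', a', comp'⟩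
      rw [hst] at hs
      simp only [List.foldl_cons, hst, ih h' a' comp', List.any_cons]
      simp only at hs
      rw [hs]
      cases pvForbidden.contains c <;> simp

-- slot 0 of the composition array counts the 'C's
theorem pvStepA_comp0 (h a : Bool) (comp : List Int) (c : Char) (hne : comp ≠ []) :
    (pvStepA (h, a, comp) c).2.2.getD 0 0 = comp.getD 0 0 + (if c = 'C' then 1 else 0) := by
  obtain ⟨x, xs, rfl⟩ : ∃ x xs, comp = x :: xs := by
    rcases comp with _ | ⟨x, xs⟩
    · exact absurd rfl hne
    · exact ⟨x, xs, rfl⟩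
  by_cases hC : c = 'C'
  · subst hC
    have hi : PySem.List.index? pvHyd 'C' = some 0 := by decide
    rw [PySem.List.index?_eq_idxOf?] at hi
    simp [pvStepA, hi]
  · rcases hidx : PySem.List.index? pvHyd c with _ | i
    · rw [PySem.List.index?_eq_idxOf?] at hidx
      simp [pvStepA, hidx, hC]
    · have hcons : PySem.List.index? pvHyd c =
          (PySem.List.index? ['H', '2', '3', '(', ')', '4', '5', '6', '7', '8', '9'] c).map (· + 1) := by
        have hne' : ('C' : Char) ≠ c := fun e => hC e.symm
        simpa [pvHyd] using PySem.List.index?_cons_of_ne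
          (xs := ['H', '2', '3', '(', ')', '4', '5', '6', '7', '8', '9']) hne'
      rw [hidx] at hcons
      rcases hj : PySem.List.index? ['H', '2', '3', '(', ')', '4', '5', '6', '7', '8', '9'] c with _ | j
      · rw [hj] at hcons; simp at hcons
      · rw [hj] at hcons
        simp only [Option.map_some] at hcons
        injection hcons with hij
        subst hij
        rw [PySem.List.index?_eq_idxOf?] at hidx
        simp [pvStepA, hidx, hC]

theorem pvFoldA_comp0 (l : List Char) : ∀ (h a : Bool) (comp : List Int), comp ≠ [] →
    (l.foldl pvStepA (h, a, comp)).2.2.getD 0 0 = comp.getD 0 0 + (l.count 'C' : Int) := by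
  induction l with
  | nil => intro h a comp _; simp
  | cons c t ih =>
      intro h a comp hne
      have hs := pvStepA_comp0 h a comp c hne
      have hlen : (pvStepA (h, a, comp) c).2.2.length = comp.length := by
        rcases hidx : PySem.List.index? pvHyd c with _ | i <;>
          rw [PySem.List.index?_eq_idxOf?] at hidx <;> simp [pvStepA, hidx]
      rcases hst : pvStepA (h, a, comp) c with ⟨h', a', comp'⟩
      rw [hst] at hs hlen
      simp only at hs hlen
      have hne' : comp' ≠ [] := by
        intro h0; rw [h0] at hlen; exact hne (List.eq_nil_of_length_eq_zero hlen.symm)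
      simp only [List.foldl_cons, hst, ih h' a' comp' hne', hs, List.count_cons]
      by_cases hC : c = 'C' <;> simp [hC] <;> push_cast <;> ring

-- the divide-and-conquer pass computes: none iff a forbidden char occurs, else the C-count
theorem pvCarbons_eq_aux : ∀ (n : Nat) (l : List Char), l.length ≤ n →
    pvCarbons l = if l.any (fun c => pvForbidden.contains c) then none
                  else some ((l.count 'C' : Int)) := by
  intro n
  induction n with
  | zero =>
      intro l h
      have : l = [] := List.eq_nil_of_length_eq_zero (Nat.le_zero.1 h)
      subst this; simp [pvCarbons]
  | succ n ih =>
      intro l h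
      match l with
      | [] => simp [pvCarbons]
      | [c] =>
          by_cases hc : pvForbidden.contains c = true <;>
            simp [pvCarbons, List.count_cons]
      | a :: b :: t =>
          rw [pvCarbons]
          have hlen : (a :: b :: t).length = t.length + 2 := by simp
          have h1 : ((a :: b :: t).take ((a :: b :: t).length / 2)).length ≤ n := by
            simp at h ⊢; omega
          have h2 : ((a :: b :: t).drop ((a :: b :: t).length / 2)).length ≤ n := by
            simp at h ⊢; omega
          rw [ih _ h1, ih _ h2]
          conv_rhs => rw [← List.take_append_drop ((a :: b :: t).length / 2) (a :: b :: t)]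
          rw [List.any_append, List.count_append]
          split_ifs with hA hB hC <;> simp_all <;> tauto

theorem pvCarbons_eq (l : List Char) :
    pvCarbons l = if l.any (fun c => pvForbidden.contains c) then none
                  else some ((l.count 'C' : Int)) :=
  pvCarbons_eq_aux l.length l le_rfl

-- ===== VERDICT (by name: the statement is the Claim_ definition above) =====
theorem organic_identification_spec : Claim_equal_organic_identification := by
  intro s _ _
  unfold Spec_organic_identification organic_identification organic_identification_alt
  simp only
  rw [pvFoldA_alkane, pvFoldA_comp0 _ _ _ _ (by simp), pvCarbons_eq]
  by_cases hforb : ((PySem.Str.upper s).toList.any (fun c => pvForbidden.contains c)) = true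
  · have h2 : ∃ x ∈ PySem.Chars.upper s.toList, x ∈ pvForbidden := by simpa using hforb
    simp [h2]
  · have h2 : ¬ ∃ x ∈ PySem.Chars.upper s.toList, x ∈ pvForbidden := by simpa using hforb
    simp [h2]
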